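-- pv_equiv track=rewrite | github.com/Angel-TFG-UCLM/Entangle-Core | scripts/run_full_pipeline.py | _filter_scripts_by_entities
-- ===== SOURCE A (Python) =====
-- def _filter_scripts_by_entities(scripts, entities):
--     """Filtra scripts según las entities configuradas."""
--     entity_map = {
--         "repositories": ["run_repositories_ingestion.py", "run_repositories_enrichment.py"],
--         "users": ["run_user_ingestion.py", "run_user_enrichment.py"],
--         "organizations": ["run_organization_ingestion.py", "run_organization_enrichment.py"]
--     }
--
--     allowed = set()
--     for entity in entities:
--         allowed.update(entity_map.get(entity, []))
--
--     return [s for s in scripts if s in allowed]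
-- ===== SOURCE B (Python) =====
-- _REVERSE = {
--     "run_repositories_ingestion.py": "repositories",
--     "run_repositories_enrichment.py": "repositories",
--     "run_user_ingestion.py": "users",
--     "run_user_enrichment.py": "users",
--     "run_organization_ingestion.py": "organizations",
--     "run_organization_enrichment.py": "organizations",
-- }
--
--
-- def _filter_scripts_by_entities(scripts, entities):
--     """Filtra scripts según las entities configuradas (reverse lookup)."""
--     selected = set(entities)
--     return [s for s in scripts if _REVERSE.get(s) in selected]
-- ===== Notes on version B (the rewrite author's own statement) =====
-- stated objective: simpler
-- what changed: Replaces the entity->scripts map plus the allowed-set accumulation loop with a static reverse script->entity map; each script is kept iff its owning entity is in the selected-entities set, so no allowed set is ever built.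
import Mathlib
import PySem

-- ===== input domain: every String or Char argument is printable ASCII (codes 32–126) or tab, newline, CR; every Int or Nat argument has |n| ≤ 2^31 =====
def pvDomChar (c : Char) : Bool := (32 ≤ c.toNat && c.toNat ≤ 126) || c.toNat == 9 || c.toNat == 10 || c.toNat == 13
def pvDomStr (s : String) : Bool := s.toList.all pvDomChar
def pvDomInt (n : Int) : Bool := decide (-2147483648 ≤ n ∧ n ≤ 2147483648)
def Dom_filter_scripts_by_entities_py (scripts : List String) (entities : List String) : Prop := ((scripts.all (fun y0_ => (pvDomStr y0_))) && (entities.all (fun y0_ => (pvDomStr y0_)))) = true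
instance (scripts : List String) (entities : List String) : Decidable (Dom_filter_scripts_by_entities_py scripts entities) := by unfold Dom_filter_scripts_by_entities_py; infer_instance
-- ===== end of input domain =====

-- B replaces A's entity->scripts map and allowed-set loop with a static reverse
-- script->entity map and a per-script lookup against the selected-entities set (objective: simpler).

-- ===== PORT A =====
def pvEntityMap : PySem.Dict String (List String) :=
  PySem.Dict.ofList
    [("repositories", ["run_repositories_ingestion.py", "run_repositories_enrichment.py"]),
     ("users", ["run_user_ingestion.py", "run_user_enrichment.py"]),
     ("organizations", ["run_organization_ingestion.py", "run_organization_enrichment.py"])]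

def filter_scripts_by_entities_py (scripts : List String) (entities : List String) : List String :=
  let allowed : PySem.Set String :=
    entities.foldl (fun acc e => PySem.Set.update acc (pvEntityMap.getD e [])) PySem.Set.empty
  scripts.filter (fun s => PySem.Set.contains allowed s)

-- ===== PORT B =====
def pvReverseMap : PySem.Dict String String :=
  PySem.Dict.ofList
    [("run_repositories_ingestion.py", "repositories"),
     ("run_repositories_enrichment.py", "repositories"),
     ("run_user_ingestion.py", "users"),
     ("run_user_enrichment.py", "users"),
     ("run_organization_ingestion.py", "organizations"),
     ("run_organization_enrichment.py", "organizations")]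

def filter_scripts_by_entities_py_alt (scripts : List String) (entities : List String) : List String :=
  let selected : PySem.Set String := PySem.Set.ofList entities
  scripts.filter (fun s =>
    -- _REVERSE.get(s) in selected: None (a lookup miss) is never a member of a set of strings
    match pvReverseMap.get? s with
    | some e => PySem.Set.contains selected e
    | none => false)

-- ===== PRECONDITION & SPEC =====
def Spec_filter_scripts_by_entities_py (scripts : List String) (entities : List String) (out : List String) : Prop := out = filter_scripts_by_entities_py_alt scripts entities
instance (scripts : List String) (entities : List String) (out : List String) : Decidable (Spec_filter_scripts_by_entities_py scripts entities out) := by unfold Spec_filter_scripts_by_entities_py; infer_instance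

-- ===== CLAIM (what is proved, stated in full; the proofs are below) =====
def Claim_equal_filter_scripts_by_entities_py : Prop := ∀ (scripts : List String) (entities : List String), Dom_filter_scripts_by_entities_py scripts entities → Spec_filter_scripts_by_entities_py scripts entities (filter_scripts_by_entities_py scripts entities)

-- ===== LEMMAS AND PROOFS =====

-- membership in A's allowed set, characterised over the entity loop
theorem pv_mem_allowed (s : String) (entities : List String) (acc : PySem.Set String) :
    s ∈ entities.foldl (fun acc e => PySem.Set.update acc (pvEntityMap.getD e [])) acc ↔
      s ∈ acc ∨ ∃ e ∈ entities, s ∈ pvEntityMap.getD e [] := by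
  induction entities generalizing acc with
  | nil => simp
  | cons e rest ih =>
    simp [ih, PySem.Set.mem_update]
    tauto

-- the two static maps are mutual inverses, stated pointwise over arbitrary strings
theorem pv_maps_inverse (s e : String) :
    s ∈ pvEntityMap.getD e [] ↔ pvReverseMap.get? s = some e := by
  have hE : pvEntityMap = PySem.Dict.mk
      [("repositories", ["run_repositories_ingestion.py", "run_repositories_enrichment.py"]),
       ("users", ["run_user_ingestion.py", "run_user_enrichment.py"]),
       ("organizations", ["run_organization_ingestion.py", "run_organization_enrichment.py"])] := rfl
  have hR : pvReverseMap = PySem.Dict.mk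
      [("run_repositories_ingestion.py", "repositories"),
       ("run_repositories_enrichment.py", "repositories"),
       ("run_user_ingestion.py", "users"),
       ("run_user_enrichment.py", "users"),
       ("run_organization_ingestion.py", "organizations"),
       ("run_organization_enrichment.py", "organizations")] := rfl
  rw [hE, hR, PySem.Dict.getD_eq_get?_getD]
  simp only [PySem.Dict.get?_mk_cons, beq_iff_eq]
  split_ifs <;> subst_vars <;> first | decide | simp_all [PySem.Dict.get?, List.find?, eq_comm]

-- ===== VERDICT (by name: the statement is the Claim_ definition above) =====
theorem filter_scripts_by_entities_py_spec : Claim_equal_filter_scripts_by_entities_py := by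
  intro scripts entities _
  unfold Spec_filter_scripts_by_entities_py filter_scripts_by_entities_py filter_scripts_by_entities_py_alt
  refine List.filter_congr (fun s _ => ?_)
  cases hrev : pvReverseMap.get? s with
  | none =>
    rw [Bool.eq_false_iff]
    intro htrue
    rw [PySem.Set.contains_iff, pv_mem_allowed] at htrue
    rcases htrue with hacc | ⟨e, _, hmem⟩
    · simp [PySem.Set.empty] at hacc
    · rw [pv_maps_inverse, hrev] at hmem
      cases hmem
  | some e0 =>
    rw [Bool.eq_iff_iff, PySem.Set.contains_iff, PySem.Set.contains_iff,
      pv_mem_allowed, PySem.Set.mem_ofList]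
    constructor
    · rintro (hacc | ⟨e, he, hmem⟩)
      · simp [PySem.Set.empty] at hacc
      · rw [pv_maps_inverse, hrev] at hmem
        cases hmem; exact he
    · intro he
      exact Or.inr ⟨e0, he, (pv_maps_inverse s e0).mpr hrev⟩
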